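-- pv_equiv track=rewrite | github.com/blzzua/codewars | 6-kyu/simple_fun_162_pair_wise.py | pairwise
-- ===== SOURCE A (Python) =====
-- def pairwise(arr, n):
--     added_indices = set()
--     res = 0
--     for i, val1 in enumerate(arr):
--         for j, val2 in enumerate(arr[i+1:], i+1):
--             if val1 + val2 == n:
--                 if i not in added_indices and j not in added_indices:
--                     added_indices.add(i)
--                     added_indices.add(j)
--                     res += (i+j)
--     return res
-- ===== SOURCE B (Python) =====
-- def pairwise(arr, n):
--     pos = {}
--     for k, v in enumerate(arr):
--         if v in pos:
--             pos[v].append(k)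
--         else:
--             pos[v] = [k]
--     matched = [False] * len(arr)
--     res = 0
--     for i, v in enumerate(arr):
--         if not matched[i]:
--             for j in pos.get(n - v, []):
--                 if j > i and not matched[j]:
--                     matched[i] = True
--                     matched[j] = True
--                     res += i + j
--                     break
--     return res
-- ===== Notes on version B (the rewrite author's own statement) =====
-- stated objective: faster
-- what changed: A rescans (and re-slices) the whole tail of the array for every outer index; B builds one value->indices map up front and, per unmatched index i, scans only the (usually tiny) index queue of the complement value n-arr[i], tracking matches in a flag array.
import Mathlib
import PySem

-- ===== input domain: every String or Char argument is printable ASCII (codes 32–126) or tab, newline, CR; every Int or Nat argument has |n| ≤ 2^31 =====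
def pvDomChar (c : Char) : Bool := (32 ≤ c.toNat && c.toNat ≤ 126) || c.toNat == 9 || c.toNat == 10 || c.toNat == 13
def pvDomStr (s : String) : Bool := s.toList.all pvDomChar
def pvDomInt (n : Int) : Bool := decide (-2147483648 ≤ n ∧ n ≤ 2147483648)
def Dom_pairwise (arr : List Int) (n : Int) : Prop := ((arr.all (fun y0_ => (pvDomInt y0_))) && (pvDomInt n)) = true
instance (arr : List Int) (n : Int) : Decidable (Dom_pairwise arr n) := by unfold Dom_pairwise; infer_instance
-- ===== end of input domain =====

-- B replaces A's quadratic inner scan (with a fresh slice per outer index) by a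
-- value→indices map built once, plus matched flags; same return value, measurably faster.

-- ===== PORT A =====
-- body of A's inner loop (over j, val2), state = (added_indices, res)
def pairwiseInnerStep (n i val1 : Int) (st : PySem.Set Int × Int) (q : Int × Int) :
    PySem.Set Int × Int :=
  if val1 + q.2 == n then
    if !(PySem.Set.contains st.1 i) && !(PySem.Set.contains st.1 q.1) then
      (PySem.Set.add (PySem.Set.add st.1 i) q.1, st.2 + (i + q.1))
    else st
  else st

-- A's inner loop: for j, val2 in enumerate(arr[i+1:], i+1)
def pairwiseInner (arr : List Int) (n : Int) (st : PySem.Set Int × Int) (p : Int × Int) :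
    PySem.Set Int × Int :=
  (PySem.List.enumerate (PySem.List.slice arr (some (p.1 + 1)) none) (p.1 + 1)).foldl
    (pairwiseInnerStep n p.1 p.2) st

def pairwise (arr : List Int) (n : Int) : Int :=
  ((PySem.List.enumerate arr 0).foldl (pairwiseInner arr n)
    ((PySem.Set.empty : PySem.Set Int), (0 : Int))).2

-- ===== PORT B =====
-- pos.setdefault(v, []).append(k)  (value at key p.2, default [], gets p.1 appended in place)
def pairwisePos (arr : List Int) : PySem.Dict Int (List Int) :=
  (PySem.List.enumerate arr 0).foldl
    (fun d p => d.modify p.2 [] (· ++ [p.1])) PySem.Dict.empty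

-- B's inner loop: first j in the queue with j > i and not matched[j] (the 'break' loop)
def pairwiseFindB (i : Int) (matched : List Bool) : List Int → Option Int
  | [] => none
  | j :: rest =>
    if decide (i < j) && !(PySem.List.pyGetD matched j false) then some j
    else pairwiseFindB i matched rest

-- body of B's outer loop (over i, v), state = (matched, res)
def pairwiseAltStep (pos : PySem.Dict Int (List Int)) (n : Int)
    (st : List Bool × Int) (p : Int × Int) : List Bool × Int :=
  if !(PySem.List.pyGetD st.1 p.1 false) then
    match pairwiseFindB p.1 st.1 (pos.getD (n - p.2) []) with
    | some j => (PySem.List.pySetD (PySem.List.pySetD st.1 p.1 true) j true, st.2 + (p.1 + j))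
    | none => st
  else st

def pairwise_alt (arr : List Int) (n : Int) : Int :=
  ((PySem.List.enumerate arr 0).foldl (pairwiseAltStep (pairwisePos arr) n)
    (List.replicate arr.length false, (0 : Int))).2

-- ===== PRECONDITION & SPEC =====
def Spec_pairwise (arr : List Int) (n : Int) (out : Int) : Prop := out = pairwise_alt arr n
instance (arr : List Int) (n : Int) (out : Int) : Decidable (Spec_pairwise arr n out) := by unfold Spec_pairwise; infer_instance

-- ===== CLAIM (what is proved, stated in full; the proofs are below) =====
def Claim_equal_pairwise : Prop := ∀ (arr : List Int) (n : Int), Dom_pairwise arr n → Spec_pairwise arr n (pairwise arr n)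

-- ===== LEMMAS AND PROOFS =====

-- A's inner loop does nothing once i is in the set
theorem foldl_innerStep_contained (n i val1 : Int) :
    ∀ (l : List (Int × Int)) (st : PySem.Set Int × Int),
      PySem.Set.contains st.1 i = true →
      l.foldl (pairwiseInnerStep n i val1) st = st := by
  intro l
  induction l with
  | nil => intro st h; rfl
  | cons a t ih =>
    intro st h
    have h' : i ∈ st.1 := by simpa using h
    have hstep : pairwiseInnerStep n i val1 st a = st := by
      unfold pairwiseInnerStep; simp [h']
    rw [List.foldl_cons, hstep, ih st h]

-- A's inner loop, when i is free, performs the first qualifying match (or nothing)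
theorem foldl_innerStep_free (n i val1 : Int) :
    ∀ (l : List (Int × Int)) (S : PySem.Set Int) (res : Int),
      PySem.Set.contains S i = false →
      l.foldl (pairwiseInnerStep n i val1) (S, res) =
        match l.find? (fun q => (val1 + q.2 == n) && !(PySem.Set.contains S q.1)) with
        | none => (S, res)
        | some q => (PySem.Set.add (PySem.Set.add S i) q.1, res + (i + q.1)) := by
  intro l
  induction l with
  | nil => intro S res h; rfl
  | cons a t ih =>
    intro S res h
    have h' : i ∉ S := by simpa using h
    by_cases hp : ((val1 + a.2 == n) && !(PySem.Set.contains S a.1)) = true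
    · have hp' : val1 + a.2 = n ∧ a.1 ∉ S := by simpa using hp
      have hstep : pairwiseInnerStep n i val1 (S, res) a =
          (PySem.Set.add (PySem.Set.add S i) a.1, res + (i + a.1)) := by
        unfold pairwiseInnerStep; simp [hp'.1, hp'.2, h']
      have hcont : PySem.Set.contains (PySem.Set.add (PySem.Set.add S i) a.1) i = true := by
        simp [PySem.Set.mem_add]
      rw [List.foldl_cons, hstep, foldl_innerStep_contained n i val1 t _ hcont]
      simp [List.find?_cons, hp'.1, hp'.2]
    · have hp' : val1 + a.2 = n → a.1 ∈ S := by
        by_cases hb : val1 + a.2 = n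
        · intro _
          by_contra hm
          exact hp (by simp [hb, hm])
        · intro hb'; exact absurd hb' hb
      have hstep : pairwiseInnerStep n i val1 (S, res) a = (S, res) := by
        unfold pairwiseInnerStep
        by_cases hb : val1 + a.2 = n
        · simp [hb, hp' hb]
        · simp [hb]
      rw [List.foldl_cons, hstep, ih S res h]
      have hpf : ((val1 + a.2 == n) && !(PySem.Set.contains S a.1)) = false := by
        simpa using hp
      rw [List.find?_cons]
      simp only [hpf]

-- B's break-loop is a find-first
theorem findB_eq_find? (i : Int) (m : List Bool) :
    ∀ l : List Int, pairwiseFindB i m l =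
      l.find? (fun j => decide (i < j) && !(PySem.List.pyGetD m j false)) := by
  intro l
  induction l with
  | nil => rfl
  | cons a t ih =>
    simp only [pairwiseFindB, List.find?_cons]
    cases hc : (decide (i < a) && !(PySem.List.pyGetD m a false)) with
    | true => simp [hc]
    | false => simp [hc, ih]

-- the grouping fold: the queue of a value w is the list of indices of w, in order
theorem posFold_getD :
    ∀ (l : List (Int × Int)) (d : PySem.Dict Int (List Int)) (w : Int),
      (l.foldl (fun d p => d.modify p.2 [] (· ++ [p.1])) d).getD w [] =
        d.getD w [] ++ (l.filter (fun p => p.2 == w)).map (fun p => p.1) := by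
  intro l
  induction l with
  | nil => intro d w; simp
  | cons a t ih =>
    intro d w
    rw [List.foldl_cons, ih, PySem.Dict.getD_modify]
    by_cases hw : w = a.2
    · simp [List.filter_cons, hw, beq_iff_eq]
    · have : (a.2 == w) = false := by simp [beq_iff_eq]; omega
      simp [List.filter_cons, hw, this]

-- searching the projected filtered list = searching the pair list
theorem find?_map_filter (w : Int) (P : Int → Bool) :
    ∀ l : List (Int × Int),
      ((l.filter (fun p => p.2 == w)).map (fun p => p.1)).find? P =
        (l.find? (fun q => (q.2 == w) && P q.1)).map (fun p => p.1) := by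
  intro l
  induction l with
  | nil => rfl
  | cons a t ih =>
    by_cases hw : (a.2 == w) = true
    · by_cases hP : P a.1 = true
      · simp [List.filter_cons, hw, List.find?_cons, hP]
      · simp [List.filter_cons, hw, List.find?_cons, hP, ih]
    · have hw' : (a.2 == w) = false := by simpa using hw
      simp [List.filter_cons, hw', List.find?_cons, ih]

theorem find?_congr_mem {α : Type} (P Q : α → Bool) :
    ∀ l : List α, (∀ x ∈ l, P x = Q x) → l.find? P = l.find? Q := by
  intro l
  induction l with
  | nil => intro _; rfl
  | cons a t ih =>
    intro h
    rw [List.find?_cons, List.find?_cons, h a (List.mem_cons_self),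
      ih (fun x hx => h x (List.mem_cons_of_mem _ hx))]

-- the main lockstep invariant: matched[k] agrees with membership in A's set
theorem mainLoop (arr : List Int) (n : Int) :
    ∀ (c t : Nat) (S : PySem.Set Int) (matched : List Bool) (res : Int),
      t + c = arr.length →
      matched.length = arr.length →
      (∀ k : Nat, k < arr.length →
        PySem.List.pyGetD matched (k : Int) false = PySem.Set.contains S (k : Int)) →
      ((PySem.List.enumerate (arr.drop t) (t : Int)).foldl (pairwiseInner arr n) (S, res)).2 =
      ((PySem.List.enumerate (arr.drop t) (t : Int)).foldl
        (pairwiseAltStep (pairwisePos arr) n) (matched, res)).2 := by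
  intro c
  induction c with
  | zero =>
    intro t S matched res hlen _ _
    have hnil : arr.drop t = [] := List.drop_eq_nil_of_le (by omega)
    simp [hnil]
  | succ c ih =>
    intro t S matched res hlen hmlen hinv
    have ht : t < arr.length := by omega
    have hdrop : arr.drop t = arr[t] :: arr.drop (t + 1) := List.drop_eq_getElem_cons ht
    rw [hdrop, PySem.List.enumerate_cons, List.foldl_cons, List.foldl_cons]
    have hcast : (t : Int) + 1 = ((t + 1 : Nat) : Int) := by push_cast; ring
    have hslice : PySem.List.slice arr (some ((t : Int) + 1)) none = arr.drop (t + 1) := by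
      rw [hcast, PySem.List.slice_from_natCast]
    by_cases hc : PySem.Set.contains S ((t : Nat) : Int) = true
    · have hA : pairwiseInner arr n (S, res) (((t : Nat) : Int), arr[t]) = (S, res) :=
        foldl_innerStep_contained n _ _ _ _ hc
      have hB : pairwiseAltStep (pairwisePos arr) n (matched, res) (((t : Nat) : Int), arr[t])
          = (matched, res) := by
        unfold pairwiseAltStep
        have hm : PySem.List.pyGetD matched ((t : Nat) : Int) false = true :=
          (hinv t ht).trans hc
        simp [hm]
      rw [hA, hB, hcast]
      exact ih (t + 1) S matched res (by omega) hmlen hinv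
    · have hc' : PySem.Set.contains S ((t : Nat) : Int) = false := by simpa using hc
      have hm : PySem.List.pyGetD matched ((t : Nat) : Int) false = false :=
        (hinv t ht).trans hc'
      -- A's step
      have hA : pairwiseInner arr n (S, res) (((t : Nat) : Int), arr[t]) =
          match (PySem.List.enumerate (arr.drop (t + 1)) ((t : Int) + 1)).find?
              (fun q => (arr[t] + q.2 == n) && !(PySem.Set.contains S q.1)) with
          | none => (S, res)
          | some q => (PySem.Set.add (PySem.Set.add S ((t : Nat) : Int)) q.1,
              res + (((t : Nat) : Int) + q.1)) := by
        unfold pairwiseInner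
        simp only [hslice]
        exact foldl_innerStep_free n _ _ _ _ _ hc'
      -- B's queue for value n - arr[t]
      have hq : (pairwisePos arr).getD (n - arr[t]) [] =
          ((PySem.List.enumerate arr 0).filter (fun p => p.2 == n - arr[t])).map
            (fun p => p.1) := by
        unfold pairwisePos
        rw [posFold_getD]
        simp
      -- split the index list at t+1
      have htk : arr.take (t + 1) ++ arr.drop (t + 1) = arr := List.take_append_drop _ _
      have htl : (arr.take (t + 1)).length = t + 1 := by simp; omega
      have henum : PySem.List.enumerate arr 0 =
          PySem.List.enumerate (arr.take (t + 1)) 0 ++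
          PySem.List.enumerate (arr.drop (t + 1)) ((t : Int) + 1) := by
        conv_lhs => rw [← htk]
        rw [PySem.List.enumerate_append, htl]
        norm_num
      -- B's search skips the prefix (all its indices are ≤ t)
      have hBfind : pairwiseFindB ((t : Nat) : Int) matched
            ((pairwisePos arr).getD (n - arr[t]) []) =
          ((PySem.List.enumerate (arr.drop (t + 1)) ((t : Int) + 1)).find?
            (fun q => (arr[t] + q.2 == n) && !(PySem.Set.contains S q.1))).map
            (fun p => p.1) := by
        rw [hq, henum, List.filter_append, List.map_append, findB_eq_find?,
          List.find?_append]
        have hpre : ((( PySem.List.enumerate (arr.take (t + 1)) 0).filter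
              (fun p => p.2 == n - arr[t])).map (fun p => p.1)).find?
              (fun j => decide (((t : Nat) : Int) < j) &&
                !(PySem.List.pyGetD matched j false)) = none := by
          rw [List.find?_eq_none]
          intro x hx
          simp only [List.mem_map, List.mem_filter] at hx
          obtain ⟨p, ⟨hpmem, _⟩, rfl⟩ := hx
          rw [PySem.List.mem_enumerate_iff] at hpmem
          obtain ⟨k, hk, rfl⟩ := hpmem
          have hkl : k < t + 1 := htl ▸ hk
          simp only [Bool.and_eq_true, decide_eq_true_eq, not_and]
          intro hlt
          omega
        rw [hpre, Option.none_or, ← findB_eq_find?, findB_eq_find?, find?_map_filter]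
        congr 1
        apply find?_congr_mem
        intro q hq'
        rw [PySem.List.mem_enumerate_iff] at hq'
        obtain ⟨k, hk, rfl⟩ := hq'
        have hk2 : t + 1 + k < arr.length := by
          have hk' := hk
          simp only [List.length_drop] at hk'
          omega
        have e1 : (t : Int) + 1 + (k : Int) = ((t + 1 + k : Nat) : Int) := by push_cast; ring
        have e2 : decide (((t : Nat) : Int) < (t : Int) + 1 + (k : Int)) = true := by
          simp; omega
        have e3 : PySem.List.pyGetD matched ((t : Int) + 1 + (k : Int)) false =
            PySem.Set.contains S ((t : Int) + 1 + (k : Int)) := by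
          rw [e1]; exact hinv (t + 1 + k) hk2
        have hget : (arr.drop (t + 1))[k] = arr[t + 1 + k] := by
          rw [List.getElem_drop]
        have e4 : ((arr.drop (t + 1))[k] == n - arr[t]) = (arr[t] + (arr.drop (t + 1))[k] == n) := by
          rw [hget]
          by_cases he : arr[t + 1 + k] = n - arr[t]
          · simp [he, show arr[t] + (n - arr[t]) = n by ring]
          · have h1 : (arr[t + 1 + k] == n - arr[t]) = false := by simp [he]
            have h2 : (arr[t] + arr[t + 1 + k] == n) = false := by
              simp; omega
            rw [h1, h2]
        rw [e4, e2, e3, Bool.true_and]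
      -- case split on the common first match
      cases hfind : (PySem.List.enumerate (arr.drop (t + 1)) ((t : Int) + 1)).find?
          (fun q => (arr[t] + q.2 == n) && !(PySem.Set.contains S q.1)) with
      | none =>
        have hA' : pairwiseInner arr n (S, res) (((t : Nat) : Int), arr[t]) = (S, res) := by
          rw [hA, hfind]
        have hB' : pairwiseAltStep (pairwisePos arr) n (matched, res) (((t : Nat) : Int), arr[t])
            = (matched, res) := by
          unfold pairwiseAltStep
          simp only [hm, Bool.not_false, if_true]
          rw [hBfind, hfind]
          rfl
        rw [hA', hB', hcast]
        exact ih (t + 1) S matched res (by omega) hmlen hinv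
      | some q =>
        obtain ⟨k, hk, hqe⟩ :=
          (PySem.List.mem_enumerate_iff _ _ _).1 (List.mem_of_find?_eq_some hfind)
        have hk' := hk
        simp only [List.length_drop] at hk'
        have hk2 : t + 1 + k < arr.length := by omega
        have hq1 : q.1 = ((t + 1 + k : Nat) : Int) := by rw [hqe]; push_cast; ring
        have hA' : pairwiseInner arr n (S, res) (((t : Nat) : Int), arr[t]) =
            (PySem.Set.add (PySem.Set.add S ((t : Nat) : Int)) q.1,
             res + (((t : Nat) : Int) + q.1)) := by
          rw [hA, hfind]
        have hB' : pairwiseAltStep (pairwisePos arr) n (matched, res) (((t : Nat) : Int), arr[t]) =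
            (PySem.List.pySetD (PySem.List.pySetD matched ((t : Nat) : Int) true) q.1 true,
             res + (((t : Nat) : Int) + q.1)) := by
          unfold pairwiseAltStep
          simp only [hm, Bool.not_false, if_true]
          rw [hBfind, hfind]
          rfl
        have hlen1 : (PySem.List.pySetD matched ((t : Nat) : Int) true).length = arr.length := by
          rw [PySem.List.length_pySetD]; exact hmlen
        have hmlen' :
            (PySem.List.pySetD (PySem.List.pySetD matched ((t : Nat) : Int) true) q.1 true).length
              = arr.length := by
          rw [PySem.List.length_pySetD]; exact hlen1
        have hinv' : ∀ k' : Nat, k' < arr.length →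
            PySem.List.pyGetD
              (PySem.List.pySetD (PySem.List.pySetD matched ((t : Nat) : Int) true) q.1 true)
              ((k' : Nat) : Int) false =
            PySem.Set.contains (PySem.Set.add (PySem.Set.add S ((t : Nat) : Int)) q.1)
              ((k' : Nat) : Int) := by
          intro k' hk'2
          have step1 : PySem.List.pyGetD
              (PySem.List.pySetD (PySem.List.pySetD matched ((t : Nat) : Int) true) q.1 true)
              ((k' : Nat) : Int) false =
              if k' = t + 1 + k then true
              else if k' = t then true
              else PySem.List.pyGetD matched ((k' : Nat) : Int) false := by
            rw [hq1, PySem.List.pyGetD_pySetD_natCast _ _ _ _ _ (by rw [hlen1]; exact hk2)]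
            by_cases h1 : k' = t + 1 + k
            · simp [h1]
            · rw [if_neg h1, if_neg h1,
                PySem.List.pyGetD_pySetD_natCast _ _ _ _ _ (by rw [hmlen]; exact ht)]
          have step2 : PySem.Set.contains (PySem.Set.add (PySem.Set.add S ((t : Nat) : Int)) q.1)
              ((k' : Nat) : Int) =
              if k' = t + 1 + k then true
              else if k' = t then true
              else PySem.Set.contains S ((k' : Nat) : Int) := by
            by_cases h1 : k' = t + 1 + k
            · simp [PySem.Set.mem_add, h1, hqe]
            · by_cases h2 : k' = t
              · simp [PySem.Set.mem_add, h1, h2]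
              · have ne1 : ((k' : Nat) : Int) ≠ q.1 := by
                  rw [hq1]; intro hcon
                  exact h1 (by exact_mod_cast hcon)
                have ne2 : ((k' : Nat) : Int) ≠ ((t : Nat) : Int) := by
                  intro hcon; exact h2 (by exact_mod_cast hcon)
                simp [PySem.Set.mem_add, ne1, ne2, h1, h2]
          rw [step1, step2]
          by_cases h1 : k' = t + 1 + k
          · simp [h1]
          · by_cases h2 : k' = t
            · simp [h1, h2]
            · simp only [if_neg h1, if_neg h2]
              exact hinv k' hk'2
        rw [hA', hB', hcast]
        exact ih (t + 1) _ _ _ (by omega) hmlen' hinv'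

theorem pairwise_spec' : ∀ (arr : List Int) (n : Int), pairwise arr n = pairwise_alt arr n := by
  intro arr n
  unfold pairwise pairwise_alt
  have hinv0 : ∀ k : Nat, k < arr.length →
      PySem.List.pyGetD (List.replicate arr.length false) ((k : Nat) : Int) false =
      PySem.Set.contains (PySem.Set.empty : PySem.Set Int) ((k : Nat) : Int) := by
    intro k hk
    rw [PySem.List.pyGetD_natCast]
    simp [PySem.Set.empty, PySem.Set.contains]
  have h := mainLoop arr n arr.length 0 PySem.Set.empty (List.replicate arr.length false) 0
    (by omega) (by simp) hinv0
  simpa using h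

-- ===== VERDICT (by name: the statement is the Claim_ definition above) =====
theorem pairwise_spec : Claim_equal_pairwise := by
  intro arr n _
  unfold Spec_pairwise
  exact pairwise_spec' arr n
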